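-- pv_equiv track=rewrite | github.com/ThiagoPavin/Paradigmas | extras/Extra (t1 em python).py | funcAUX
-- ===== SOURCE A (Python) =====
-- def funcAUX(str):
--   caracter ='qwertyuiopasdfghjklzxcvbnmQWERTYUIOPASDFGHJKLZXCVBNMÇç0123456789'
--   nova_str =''
--   Tam = len(str)
--   AUX = 10
--   if Tam >= 10:
--     for c in str:
--       if c in caracter and AUX > 0:
--         nova_str = nova_str + c
--         AUX = AUX - 1
--   else:
--     for c in str:
--       if c in caracter:
--         nova_str = nova_str + c
--     AUX = 10 - Tam
--     for c in range(0,AUX):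
--       nova_str = nova_str + '.'
--
--   return nova_str
-- ===== SOURCE B (Python) =====
-- def funcAUX(str):
--   caracter = 'qwertyuiopasdfghjklzxcvbnmQWERTYUIOPASDFGHJKLZXCVBNMÇç0123456789'
--   def take(s, k):
--     if not s or k == 0:
--       return ''
--     if s[0] in caracter:
--       return s[0] + take(s[1:], k - 1)
--     return take(s[1:], k)
--   kept = take(str, 10)
--   if len(str) >= 10:
--     return kept
--   return kept + '.' * (10 - len(str))
-- ===== Notes on version B (the rewrite author's own statement) =====
-- stated objective: alternative
-- what changed: Replaces A's two separate per-branch filtering loops (counter-decrementing accumulator loop vs filter loop plus a range loop of dot appends) by ONE recursive helper take(s,k) that builds the kept prefix front-to-back by recursion on the string with a budget of 10, used uniformly in both branches and stopping as soon as the budget is spent instead of scanning the rest of the string.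
import Mathlib
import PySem

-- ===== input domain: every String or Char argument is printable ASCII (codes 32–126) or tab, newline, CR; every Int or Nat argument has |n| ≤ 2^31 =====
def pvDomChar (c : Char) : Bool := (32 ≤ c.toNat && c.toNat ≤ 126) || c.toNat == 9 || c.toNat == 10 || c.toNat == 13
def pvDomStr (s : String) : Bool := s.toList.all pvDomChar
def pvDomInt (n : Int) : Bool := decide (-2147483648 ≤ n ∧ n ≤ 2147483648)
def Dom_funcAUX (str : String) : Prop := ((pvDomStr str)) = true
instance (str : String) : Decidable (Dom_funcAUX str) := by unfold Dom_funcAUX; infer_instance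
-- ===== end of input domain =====

-- B replaces A's two per-branch loops by one recursive budgeted helper used in both branches
-- (objective: alternative decomposition, same cost).

-- the literal alphabet string of the Python source, as a character list
def pvCaracter : List Char :=
  "qwertyuiopasdfghjklzxcvbnmQWERTYUIOPASDFGHJKLZXCVBNMÇç0123456789".toList

-- ===== PORT A =====
-- literal transliteration: branch on len(str) >= 10; first branch folds with counter AUX,
-- second branch filters then appends 10 - Tam dots (the range(0,AUX) loop)
def funcAUX (str : String) : String :=
  let Tam := str.toList.length
  if Tam ≥ 10 then
    let st := str.toList.foldl
      (fun (s : List Char × Nat) c =>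
        if pvCaracter.contains c ∧ s.2 > 0 then (s.1 ++ [c], s.2 - 1) else s)
      ([], 10)
    String.ofList st.1
  else
    let nova := str.toList.foldl
      (fun (s : List Char) c => if pvCaracter.contains c then s ++ [c] else s) []
    String.ofList (nova ++ List.replicate (10 - Tam) '.')

-- ===== PORT B =====
-- Source B's recursive helper take(s, k): first k valid chars, built front-to-back by recursion
def pvTake (s : List Char) (k : Nat) : List Char :=
  match s, k with
  | [], _ => []
  | _, 0 => []
  | c :: rest, Nat.succ m =>
    if pvCaracter.contains c then c :: pvTake rest m else pvTake rest (m + 1)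

def funcAUX_alt (str : String) : String :=
  let kept := pvTake str.toList 10
  if str.toList.length ≥ 10 then String.ofList kept
  else String.ofList (kept ++ List.replicate (10 - str.toList.length) '.')

-- ===== PRECONDITION & SPEC =====
def Spec_funcAUX (str : String) (out : String) : Prop := out = funcAUX_alt str
instance (str : String) (out : String) : Decidable (Spec_funcAUX str out) := by unfold Spec_funcAUX; infer_instance

-- ===== CLAIM (what is proved, stated in full; the proofs are below) =====
def Claim_equal_funcAUX : Prop := ∀ (str : String), Dom_funcAUX str → Spec_funcAUX str (funcAUX str)

-- ===== LEMMAS AND PROOFS =====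

-- B's recursion computes the first k elements of the filter
theorem pv_take_eq_filter_take :
    ∀ (cs : List Char) (k : Nat),
      pvTake cs k = (cs.filter (fun c => pvCaracter.contains c)).take k := by
  intro cs
  induction cs with
  | nil => intro k; cases k <;> simp [pvTake]
  | cons c rest ih =>
    intro k
    cases k with
    | zero => simp [pvTake]
    | succ m =>
      by_cases hp : pvCaracter.contains c = true
      · rw [pvTake, if_pos hp, List.filter_cons_of_pos hp, List.take_succ_cons, ih]
      · rw [pvTake, if_neg hp, List.filter_cons_of_neg (by simpa using hp), ih]

-- A's counting fold computes the first n elements of the filter, appended to the accumulator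
theorem pv_fold_counter (p : Char → Bool) :
    ∀ (cs acc : List Char) (n : Nat),
      (cs.foldl (fun (s : List Char × Nat) c =>
          if p c = true ∧ s.2 > 0 then (s.1 ++ [c], s.2 - 1) else s) (acc, n)).1
        = acc ++ (cs.filter p).take n := by
  intro cs
  induction cs with
  | nil => intro acc n; simp
  | cons c rest ih =>
    intro acc n
    by_cases hp : p c = true
    · cases n with
      | zero =>
        rw [List.foldl_cons, if_neg (by simp), ih, List.filter_cons_of_pos hp]
        simp
      | succ m =>
        rw [List.foldl_cons, if_pos ⟨hp, Nat.succ_pos m⟩, ih, List.filter_cons_of_pos hp]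
        simp
    · simp only [List.foldl_cons, List.filter_cons_of_neg (by simpa using hp)]
      rw [if_neg (by simp [hp])]
      exact ih acc n

-- A's plain filtering fold is List.filter, appended to the accumulator
theorem pv_fold_filter (p : Char → Bool) :
    ∀ (cs acc : List Char),
      cs.foldl (fun (s : List Char) c => if p c = true then s ++ [c] else s) acc
        = acc ++ cs.filter p := by
  intro cs
  induction cs with
  | nil => intro acc; simp
  | cons c rest ih =>
    intro acc
    by_cases hp : p c = true
    · simp [hp, ih, List.filter_cons_of_pos hp]
    · simp [hp, ih, List.filter_cons_of_neg (by simpa using hp)]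

-- ===== VERDICT (by name: the statement is the Claim_ definition above) =====
theorem funcAUX_spec : Claim_equal_funcAUX := by
  intro str _
  unfold Spec_funcAUX funcAUX funcAUX_alt
  by_cases h : str.toList.length ≥ 10
  · simp only [h, pv_fold_counter (fun c => pvCaracter.contains c) str.toList [] 10,
      pv_take_eq_filter_take]
    simp
  · simp only [h, pv_fold_filter (fun c => pvCaracter.contains c) str.toList [],
      pv_take_eq_filter_take]
    have hlen : (str.toList.filter (fun c => decide (c ∈ pvCaracter))).length ≤ 10 :=
      le_trans (List.length_filter_le _ _) (by omega)
    simp [List.take_of_length_le hlen]
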